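-- pv_equiv track=rewrite | github.com/EmilianoG-byte/iqm-benchmarks | src/iqm/benchmarks/randomized_benchmarking/randomized_benchmarking_common.py | relabel_qubits_array_from_zero
-- ===== SOURCE A (Python) =====
-- from typing import Any, Callable, Dict, List, Optional, Tuple, cast
--
-- def relabel_qubits_array_from_zero(arr: List[List[int]]) -> List[List[int]]:
--     """Helper function to relabel a qubits array to an increasingly ordered one starting from zero
--     e.g., [[2,3], [5], [7,8]]  ->  [[0,1], [2], [3,4]]
--     Note: this assumes the input array is sorted in increasing order!
--     """
--     # Flatten the original array
--     flat_list = [item for sublist in arr for item in sublist]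
--     # Generate a list of ordered numbers with the same length as the flattened array
--     ordered_indices = list(range(len(flat_list)))
--     # Reconstruct the list of lists structure
--     result = []
--     index = 0
--     for sublist in arr:
--         result.append(ordered_indices[index : index + len(sublist)])
--         index += len(sublist)
--     return result
-- ===== SOURCE B (Python) =====
-- from typing import List
--
-- def relabel_qubits_array_from_zero(arr: List[List[int]]) -> List[List[int]]:
--     # Build the answer back-to-front: each new (earlier) sublist gets labels
--     # starting at 0 and shifts everything already built up by its length.
--     result: List[List[int]] = []
--     for sub in reversed(arr):
--         result = [list(range(len(sub)))] + [[x + len(sub) for x in s] for s in result]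
--     return result
-- ===== Notes on version B (the rewrite author's own statement) =====
-- stated objective: alternative
-- what changed: Builds the answer back-to-front with no flat list, index table or running counter: each earlier sublist gets labels 0..len-1 and shifts the already-built suffix up by its length.
import Mathlib
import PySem

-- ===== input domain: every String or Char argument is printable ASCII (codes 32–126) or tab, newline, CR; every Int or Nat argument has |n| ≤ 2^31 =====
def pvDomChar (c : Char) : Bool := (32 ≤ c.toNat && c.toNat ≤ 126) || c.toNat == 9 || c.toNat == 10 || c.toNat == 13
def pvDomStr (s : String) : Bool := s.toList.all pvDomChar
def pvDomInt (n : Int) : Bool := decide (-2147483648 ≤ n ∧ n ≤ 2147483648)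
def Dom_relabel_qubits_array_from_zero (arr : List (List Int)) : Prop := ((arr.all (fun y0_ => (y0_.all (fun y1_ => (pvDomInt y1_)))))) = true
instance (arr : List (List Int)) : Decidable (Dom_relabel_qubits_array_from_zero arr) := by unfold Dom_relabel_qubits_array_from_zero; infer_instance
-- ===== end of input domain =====

-- B replaces A's flatten → index-table → slice-back decomposition by a back-to-front
-- build with no counter: each earlier sublist gets labels 0..len-1 and shifts the
-- already-built suffix up by its length (alternative decomposition; not faster).


-- ===== PORT A =====
-- A's reconstruction loop: result-building over arr, slicing ordered_indices at a running index
def relabel_rebuild (ordered : List Int) (index : Int) : List (List Int) → List (List Int)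
  | [] => []
  | sublist :: rest =>
      PySem.List.slice ordered (some index) (some (index + sublist.length)) ::
        relabel_rebuild ordered (index + sublist.length) rest

def relabel_qubits_array_from_zero (arr : List (List Int)) : List (List Int) :=
  let flat_list := arr.flatMap (fun sublist => sublist)
  let ordered_indices := (List.range flat_list.length).map Int.ofNat
  relabel_rebuild ordered_indices 0 arr

-- ===== PORT B =====
-- B's loop over reversed(arr): prepend range(len(sub)) and shift the built suffix
def relabel_qubits_array_from_zero_alt (arr : List (List Int)) : List (List Int) :=
  arr.reverse.foldl
    (fun result sub =>
      PySem.List.pyRange 0 sub.length 1 ::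
        result.map (fun s => s.map (fun x => x + sub.length)))
    []

-- ===== PRECONDITION & SPEC =====
def Spec_relabel_qubits_array_from_zero (arr : List (List Int)) (out : List (List Int)) : Prop := out = relabel_qubits_array_from_zero_alt arr
instance (arr : List (List Int)) (out : List (List Int)) : Decidable (Spec_relabel_qubits_array_from_zero arr out) := by unfold Spec_relabel_qubits_array_from_zero; infer_instance

-- ===== CLAIM (what is proved, stated in full; the proofs are below) =====
def Claim_equal_relabel_qubits_array_from_zero : Prop := ∀ (arr : List (List Int)), Dom_relabel_qubits_array_from_zero arr → Spec_relabel_qubits_array_from_zero arr (relabel_qubits_array_from_zero arr)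

-- ===== LEMMAS AND PROOFS =====
-- B's loop as a foldr (foldl over the reversed list)
theorem relabel_alt_eq_foldr (arr : List (List Int)) :
    relabel_qubits_array_from_zero_alt arr
      = arr.foldr
          (fun sub result =>
            PySem.List.pyRange 0 sub.length 1 ::
              result.map (fun s => s.map (fun x => x + sub.length)))
          [] := by
  unfold relabel_qubits_array_from_zero_alt
  rw [List.foldl_reverse]

theorem relabel_slice_eq_pyRange (N k m : Nat) (h : k + m ≤ N) :
    PySem.List.slice ((List.range N).map Int.ofNat) (some (k : Int)) (some ((k : Int) + (m : Int)))
      = PySem.List.pyRange (k : Int) ((k : Int) + (m : Int)) 1 := by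
  rw [PySem.List.slice_natCast_add]
  apply List.ext_getElem
  · simp [PySem.List.length_pyRange_one]; omega
  · intro i h1 h2
    simp only [PySem.List.getElem_pyRange_one, List.getElem_take, List.getElem_drop,
      List.getElem_map, List.getElem_range]
    simp only [Int.ofNat_eq_natCast]; push_cast; ring

theorem relabel_pyRange_shift (k m : Nat) :
    PySem.List.pyRange (k : Int) ((k : Int) + (m : Int)) 1
      = (PySem.List.pyRange 0 (m : Int) 1).map (fun x => x + (k : Int)) := by
  apply List.ext_getElem
  · simp [PySem.List.length_pyRange_one]
  · intro i h1 h2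
    simp only [List.getElem_map, PySem.List.getElem_pyRange_one]
    ring

theorem relabel_rebuild_eq_shifted (N : Nat) (arr : List (List Int)) (k : Nat)
    (h : k + (arr.map List.length).sum ≤ N) :
    relabel_rebuild ((List.range N).map Int.ofNat) (k : Int) arr
      = (arr.foldr
          (fun sub result =>
            PySem.List.pyRange 0 sub.length 1 ::
              result.map (fun s => s.map (fun x => x + sub.length)))
          []).map (fun s => s.map (fun x => x + (k : Int))) := by
  induction arr generalizing k with
  | nil => rfl
  | cons s rest ih =>
    simp only [List.map_cons, List.sum_cons] at h
    simp only [relabel_rebuild, List.foldr_cons, List.map_cons, List.map_map]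
    congr 1
    · rw [relabel_slice_eq_pyRange N k s.length (by omega), relabel_pyRange_shift]
    · have hk : (k : Int) + (s.length : Int) = ((k + s.length : Nat) : Int) := by push_cast; ring
      rw [hk, ih (k + s.length) (by omega)]
      apply List.map_congr_left
      intro a _
      simp only [Function.comp_apply, List.map_map]
      apply List.map_congr_left
      intro x _
      simp only [Function.comp_apply]
      push_cast; ring

-- ===== VERDICT (by name: the statement is the Claim_ definition above) =====
theorem relabel_qubits_array_from_zero_spec : Claim_equal_relabel_qubits_array_from_zero := by
  intro arr _
  unfold Spec_relabel_qubits_array_from_zero relabel_qubits_array_from_zero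
  rw [relabel_alt_eq_foldr]
  have hlen : (arr.flatMap (fun sublist => sublist)).length = (arr.map List.length).sum := by
    simp
  have := relabel_rebuild_eq_shifted ((arr.flatMap (fun sublist => sublist)).length) arr 0
    (by rw [hlen]; omega)
  simpa using this
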